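-- pv_equiv track=rewrite | github.com/ananta888/ananta | tests/test_live_agent_chain_e2e.py | _select_live_goal_model
-- ===== SOURCE A (Python) =====
-- def _select_live_goal_model(models: list[dict]) -> str:
--     weighted_tokens = (
--         ("coder", 5),
--         ("instruct", 4),
--         ("chat", 4),
--         ("assistant", 3),
--         ("qwen", 2),
--         ("deepseek", 2),
--         ("llama", 1),
--         ("mistral", 1),
--     )
--     excluded_tokens = ("embed", "embedding", "rerank", "whisper", "tts", "speech", "audio", "voxtral")
--
--     def _model_id(item: dict) -> str:
--         return str(item.get("id") or item.get("name") or "").strip()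
--
--     def _score(item: dict) -> int:
--         model_id = _model_id(item).lower()
--         if any(token in model_id for token in excluded_tokens):
--             return -100
--         return sum(weight for token, weight in weighted_tokens if token in model_id)
--
--     candidates = [item for item in models if _model_id(item)]
--     preferred = sorted((item for item in candidates if _score(item) > 0), key=_score, reverse=True)
--     if preferred:
--         return _model_id(preferred[0])
--
--     fallback = [item for item in candidates if _score(item) >= 0]
--     if fallback:
--         return _model_id(fallback[0])
--
--     return _model_id(candidates[0]) if candidates else ""
-- ===== SOURCE B (Python) =====
-- def _select_live_goal_model(models: list[dict]) -> str:
--     weighted_tokens = (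
--         ("coder", 5),
--         ("instruct", 4),
--         ("chat", 4),
--         ("assistant", 3),
--         ("qwen", 2),
--         ("deepseek", 2),
--         ("llama", 1),
--         ("mistral", 1),
--     )
--     excluded_tokens = ("embed", "embedding", "rerank", "whisper", "tts", "speech", "audio", "voxtral")
--
--     def _model_id(item: dict) -> str:
--         return str(item.get("id") or item.get("name") or "").strip()
--
--     def _score(item: dict) -> int:
--         model_id = _model_id(item).lower()
--         if any(token in model_id for token in excluded_tokens):
--             return -100
--         return sum(weight for token, weight in weighted_tokens if token in model_id)
--
--     # One pass: track the first best positive-score item, the first non-negative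
--     # item, and the first candidate; no intermediate lists, no sort.
--     best = None
--     best_score = 0
--     fallback = None
--     first = None
--     for item in models:
--         if not _model_id(item):
--             continue
--         if first is None:
--             first = item
--         s = _score(item)
--         if s > best_score:
--             best, best_score = item, s
--         if fallback is None and s >= 0:
--             fallback = item
--     if best is not None:
--         return _model_id(best)
--     if fallback is not None:
--         return _model_id(fallback)
--     return _model_id(first) if first is not None else ""
-- ===== Notes on version B (the rewrite author's own statement) =====
-- stated objective: alternative
-- what changed: Replaced A's three intermediate filtered lists and stable reverse sort with a single fused left-to-right pass that tracks the first best positive-score item, the first non-negative-score item and the first candidate.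
import Mathlib
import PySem

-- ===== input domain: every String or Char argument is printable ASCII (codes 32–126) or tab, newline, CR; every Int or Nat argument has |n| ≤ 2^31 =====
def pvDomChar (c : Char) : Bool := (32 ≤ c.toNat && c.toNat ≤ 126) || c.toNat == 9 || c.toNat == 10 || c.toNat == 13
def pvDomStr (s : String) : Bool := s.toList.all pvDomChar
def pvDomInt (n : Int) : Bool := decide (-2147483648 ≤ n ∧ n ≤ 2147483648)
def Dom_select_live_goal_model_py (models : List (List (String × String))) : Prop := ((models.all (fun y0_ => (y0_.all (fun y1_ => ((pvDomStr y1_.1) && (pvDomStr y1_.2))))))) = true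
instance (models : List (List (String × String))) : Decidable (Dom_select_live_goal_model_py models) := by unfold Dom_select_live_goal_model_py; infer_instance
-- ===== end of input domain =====

-- B replaces A's intermediate lists and stable reverse sort by one fused left-to-right
-- pass tracking the first best positive-score item, the first non-negative item and the
-- first candidate (objective: alternative single-pass selection; same return value).

-- ===== PORT A =====
-- shared helpers: the Python closures _model_id and _score (identical in A and B)
def pvWeighted : List (String × Int) :=
  [("coder", 5), ("instruct", 4), ("chat", 4), ("assistant", 3),
   ("qwen", 2), ("deepseek", 2), ("llama", 1), ("mistral", 1)]

def pvExcluded : List String :=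
  ["embed", "embedding", "rerank", "whisper", "tts", "speech", "audio", "voxtral"]

-- `item.get(k) or alt` : a missing key or an empty string falls through to alt
def pvOrStr (o : Option String) (alt : String) : String :=
  match o with
  | some s => if s == "" then alt else s
  | none => alt

def pvModelId (item : List (String × String)) : String :=
  PySem.Str.strip (pvOrStr (item.lookup "id") (pvOrStr (item.lookup "name") ""))

def pvScore (item : List (String × String)) : Int :=
  let mid := PySem.Str.lower (pvModelId item)
  if pvExcluded.any (fun t => PySem.Str.isIn t mid) then -100
  else pvWeighted.foldl (fun acc tw => if PySem.Str.isIn tw.1 mid then acc + tw.2 else acc) 0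

def select_live_goal_model_py (models : List (List (String × String))) : String :=
  let candidates := models.filter (fun item => pvModelId item != "")
  let preferred := PySem.List.sorted (candidates.filter (fun item => decide (0 < pvScore item))) pvScore true
  match preferred with
  | p :: _ => pvModelId p
  | [] =>
    let fallback := candidates.filter (fun item => decide (0 ≤ pvScore item))
    match fallback with
    | f :: _ => pvModelId f
    | [] =>
      match candidates with
      | c :: _ => pvModelId c
      | [] => ""

-- ===== PORT B =====
-- the loop body of Source B, state (best, best_score, fallback, first); generic in the
-- two helper closures it calls
def pvStepB {α : Type} (mid : α → String) (score : α → Int)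
    (st : Option α × Int × Option α × Option α) (item : α) :
    Option α × Int × Option α × Option α :=
  let (best, bestScore, fb, first) := st
  if mid item == "" then st
  else
    let first := if first.isNone then some item else first
    let s := score item
    let (best, bestScore) := if bestScore < s then (some item, s) else (best, bestScore)
    let fb := if fb.isNone && decide (0 ≤ s) then some item else fb
    (best, bestScore, fb, first)

def select_live_goal_model_py_alt (models : List (List (String × String))) : String :=
  let st := models.foldl (pvStepB pvModelId pvScore) (none, 0, none, none)
  match st.1, st.2.2.1, st.2.2.2 with
  | some b, _, _ => pvModelId b
  | none, some f, _ => pvModelId f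
  | none, none, some c => pvModelId c
  | none, none, none => ""

-- ===== PRECONDITION & SPEC =====
def Spec_select_live_goal_model_py (models : List (List (String × String))) (out : String) : Prop := out = select_live_goal_model_py_alt models
instance (models : List (List (String × String))) (out : String) : Decidable (Spec_select_live_goal_model_py models out) := by unfold Spec_select_live_goal_model_py; infer_instance

-- ===== CLAIM (what is proved, stated in full; the proofs are below) =====
def Claim_equal_select_live_goal_model_py : Prop := ∀ (models : List (List (String × String))), Dom_select_live_goal_model_py models → Spec_select_live_goal_model_py models (select_live_goal_model_py models)

-- ===== LEMMAS AND PROOFS =====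

-- the "first maximum" step: what the head of a stable reverse insertion sort tracks
def pvMaxStep {α : Type} (key : α → Int) (b : Option α) (x : α) : Option α :=
  match b with
  | none => some x
  | some m => if key m < key x then some x else b

-- the running best of B, with the score it stores
def pvBs {α : Type} (score : α → Int) (b : Option α) : Int :=
  match b with
  | none => 0
  | some m => score m

def pvP {α : Type} (score : α → Int) (b : Option α) (i : α) : Option α :=
  if pvBs score b < score i then some i else b

theorem head?_insertBy_rev {α : Type} (key : α → Int) (x : α) (acc : List α) :
    (PySem.List.insertBy (fun a b => decide (key b < key a)) x acc).head? = pvMaxStep key acc.head? x := by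
  cases acc with
  | nil => rfl
  | cons a t =>
    simp only [PySem.List.insertBy, pvMaxStep]
    by_cases h : key a < key x
    · simp [h]
    · simp [h]

theorem head?_foldl_insertBy {α : Type} (key : α → Int) :
    ∀ (xs : List α) (acc : List α),
      (xs.foldl (fun acc x => PySem.List.insertBy (fun a b => decide (key b < key a)) x acc) acc).head?
        = xs.foldl (pvMaxStep key) acc.head? := by
  intro xs
  induction xs with
  | nil => intro acc; rfl
  | cons x t ih =>
    intro acc
    simp only [List.foldl_cons]
    rw [ih, head?_insertBy_rev]

-- head of sorted(xs, key, reverse=True) is the first element with maximal key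
theorem head?_sorted_rev {α : Type} (xs : List α) (key : α → Int) :
    (PySem.List.sorted xs key true).head? = xs.foldl (pvMaxStep key) none := by
  rw [PySem.List.sorted_rev_eq_foldl_insertBy, head?_foldl_insertBy]
  rfl

-- folding pvMaxStep over the positive-score filter = folding pvP over the whole list,
-- starting from a state whose stored score is positive (or none)
theorem foldl_maxStep_filter {α : Type} (score : α → Int) (xs : List α) :
    ∀ (b : Option α),
      (b = none ∨ ∃ m, b = some m ∧ 0 < score m) →
      (xs.filter (fun i => decide (0 < score i))).foldl (pvMaxStep score) b
        = xs.foldl (pvP score) b := by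
  induction xs with
  | nil => intro b _; rfl
  | cons x t ih =>
    intro b hb
    by_cases hx : 0 < score x
    · rw [show (x :: t).filter (fun i => decide (0 < score i))
          = x :: t.filter (fun i => decide (0 < score i)) by simp [hx]]
      rw [List.foldl_cons, List.foldl_cons]
      have hstep : pvMaxStep score b x = pvP score b x := by
        rcases hb with h | ⟨m, hm, hms⟩
        · subst h; simp [pvMaxStep, pvP, pvBs, hx]
        · subst hm; simp only [pvMaxStep, pvP, pvBs]
          by_cases hlt : score m < score x <;> simp [hlt]
      rw [hstep]
      apply ih
      rcases hb with h | ⟨m, hm, hms⟩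
      · subst h; right; exact ⟨x, by simp [pvP, pvBs, hx], hx⟩
      · subst hm; simp only [pvP, pvBs]
        by_cases hlt : score m < score x
        · right; exact ⟨x, by simp [hlt], lt_trans hms hlt⟩
        · right; exact ⟨m, by simp [hlt], hms⟩
    · rw [show (x :: t).filter (fun i => decide (0 < score i))
          = t.filter (fun i => decide (0 < score i)) by simp [hx]]
      rw [List.foldl_cons]
      have hP : pvP score b x = b := by
        have h1 : ¬ pvBs score b < score x := by
          rcases hb with h | ⟨m, hm, hms⟩
          · subst h; simpa [pvBs] using hx
          · subst hm; simp only [pvBs]; intro hc; exact hx (lt_trans hms hc)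
        simp [pvP, h1]
      rw [hP]
      exact ih b hb

-- B's fold, over the candidate list, computed componentwise
theorem foldl_stepB_char {α : Type} (mid : α → String) (score : α → Int) (xs : List α) :
    ∀ (b fb first : Option α),
      (∀ i ∈ xs, mid i ≠ "") →
      xs.foldl (pvStepB mid score) (b, pvBs score b, fb, first)
        = (xs.foldl (pvP score) b, pvBs score (xs.foldl (pvP score) b),
           (match fb with
            | some v => some v
            | none => xs.find? (fun i => decide (0 ≤ score i))),
           (match first with
            | some v => some v
            | none => xs.head?)) := by
  induction xs with
  | nil =>
    intro b fb first _
    simp only [List.foldl_nil, List.find?_nil, List.head?_nil]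
    cases fb <;> cases first <;> rfl
  | cons x t ih =>
    intro b fb first hne
    have hx : mid x ≠ "" := hne x (List.mem_cons_self)
    have hstep : pvStepB mid score (b, pvBs score b, fb, first) x
        = (pvP score b x, pvBs score (pvP score b x),
           (if fb.isNone && decide (0 ≤ score x) then some x else fb),
           (if first.isNone then some x else first)) := by
      simp only [pvStepB, pvP, pvBs]
      rw [if_neg (by simpa using hx)]
      by_cases hlt : (match b with | none => (0:Int) | some m => score m) < score x
      · simp [hlt]
      · simp [hlt]
    rw [List.foldl_cons, hstep,
        ih (pvP score b x) _ _ (fun i hi => hne i (List.mem_cons_of_mem x hi))]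
    refine congrArg (fun z => (t.foldl (pvP score) (pvP score b x),
        pvBs score (t.foldl (pvP score) (pvP score b x)), z)) ?_
    refine Prod.ext ?_ ?_
    · -- fallback component
      cases fb with
      | some v => simp
      | none =>
        by_cases h0 : (0:Int) ≤ score x
        · simp [h0]
        · simp [h0]
    · -- first component
      cases first with
      | some v => simp
      | none => simp
-- fold over models = fold over candidates (the skip branch is the filter)
theorem foldl_stepB_filter {α : Type} (mid : α → String) (score : α → Int)
    (models : List α) :
    ∀ st, models.foldl (pvStepB mid score) st
      = (models.filter (fun item => mid item != "")).foldl (pvStepB mid score) st := by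
  induction models with
  | nil => intro st; rfl
  | cons x t ih =>
    intro st
    by_cases h : mid x = ""
    · rw [show (x :: t).filter (fun item => mid item != "") = t.filter (fun item => mid item != "")
          by simp [h]]
      rw [List.foldl_cons, show pvStepB mid score st x = st by simp [pvStepB, h]]
      exact ih st
    · rw [show (x :: t).filter (fun item => mid item != "")
          = x :: t.filter (fun item => mid item != "") by simp [h]]
      rw [List.foldl_cons, List.foldl_cons]
      exact ih _

-- head of a filter is find?
theorem head?_filter {α : Type} (p : α → Bool) (xs : List α) :
    (xs.filter p).head? = xs.find? p := by
  induction xs with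
  | nil => rfl
  | cons x t ih =>
    by_cases h : p x
    · simp [h]
    · simp [h, ih]

-- ===== VERDICT (by name: the statement is the Claim_ definition above) =====
theorem select_live_goal_model_py_spec : Claim_equal_select_live_goal_model_py := by
  intro models _
  unfold Spec_select_live_goal_model_py
  show select_live_goal_model_py models = select_live_goal_model_py_alt models
  have hcands : ∀ i ∈ models.filter (fun item => pvModelId item != ""), pvModelId i ≠ "" := by
    intro i hi
    rw [List.mem_filter] at hi
    simpa using hi.2
  -- B's side: collapse the fold into its three relevant components
  have hB : select_live_goal_model_py_alt models
      = (match (models.filter (fun item => pvModelId item != "")).foldl (pvP pvScore) none,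
               (models.filter (fun item => pvModelId item != "")).find? (fun i => decide (0 ≤ pvScore i)),
               (models.filter (fun item => pvModelId item != "")).head? with
         | some b, _, _ => pvModelId b
         | none, some f, _ => pvModelId f
         | none, none, some c => pvModelId c
         | none, none, none => "") := by
    unfold select_live_goal_model_py_alt
    rw [foldl_stepB_filter,
        show ((none, 0, none, none) : Option (List (String × String)) × Int ×
              Option (List (String × String)) × Option (List (String × String)))
          = (none, pvBs pvScore none, none, none) from rfl,
        foldl_stepB_char pvModelId pvScore _ none none none hcands]
  rw [hB]
  -- A's side: the head of the stable reverse sort is the pvP fold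
  have hhead : (PySem.List.sorted ((models.filter (fun item => pvModelId item != "")).filter
        (fun item => decide (0 < pvScore item))) pvScore true).head?
      = (models.filter (fun item => pvModelId item != "")).foldl (pvP pvScore) none := by
    rw [head?_sorted_rev]
    exact foldl_maxStep_filter pvScore _ none (Or.inl rfl)
  simp only [select_live_goal_model_py]
  cases hpref : PySem.List.sorted ((models.filter (fun item => pvModelId item != "")).filter
      (fun item => decide (0 < pvScore item))) pvScore true with
  | cons p ps =>
    have hsome : (models.filter (fun item => pvModelId item != "")).foldl (pvP pvScore) none = some p := by
      rw [← hhead, hpref]; rfl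
    rw [hsome]
  | nil =>
    have hnone : (models.filter (fun item => pvModelId item != "")).foldl (pvP pvScore) none = none := by
      rw [← hhead, hpref]; rfl
    rw [hnone]
    have hfb : ((models.filter (fun item => pvModelId item != "")).filter
        (fun item => decide (0 ≤ pvScore item))).head?
        = (models.filter (fun item => pvModelId item != "")).find? (fun i => decide (0 ≤ pvScore i)) :=
      head?_filter _ _
    cases hfil : (models.filter (fun item => pvModelId item != "")).filter
        (fun item => decide (0 ≤ pvScore item)) with
    | cons a t =>
      rw [hfil, List.head?_cons] at hfb
      rw [← hfb]
    | nil =>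
      rw [hfil, List.head?_nil] at hfb
      rw [← hfb]
      cases hcs : models.filter (fun item => pvModelId item != "") with
      | nil => rfl
      | cons c cs => rfl
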